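-- pv_equiv track=rewrite | github.com/yaswanth8008/DSA | BinarySearch/8.Special Integer.py | solve
-- ===== SOURCE A (Python) =====
-- def solve(A, B):
--     def check(arr,k,B):
--         # This array checks if there is any sub-array of size k whose sum <= B exists
--         n = len(arr)
--         summ = 0
--         cnt = 0
--         for i in range(k):
--             summ += arr[i]
--         if summ <= B:
--             cnt += 1
--         for s in range(1,n - k + 1):
--             summ -= arr[s-1]
--             summ += arr[s+k-1]
--             if summ <= B:
--                 cnt += 1
--         if cnt == n - k + 1:
--             return True
--         else:
--             return False
--     ans = None
--     k_min = 0
--     k_max = len(A)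
--     while k_min <= k_max:
--         mid = (k_min + k_max)//2
--         if check(A,mid,B):
--             ans = mid
--             k_min = mid + 1
--         else:
--             k_max = mid - 1
--     return ans
-- ===== SOURCE B (Python) =====
-- def solve(A, B):
--     # Same bisection trajectory as the original, but the window check is a
--     # single "all" over prefix-sum differences (one precomputed table) and the
--     # search is written recursively instead of an imperative while loop.
--     n = len(A)
--     P = [0] * (n + 1)
--     for i, x in enumerate(A):
--         P[i + 1] = P[i] + x
--     def ok(k):
--         return all(P[s + k] - P[s] <= B for s in range(n - k + 1))
--     def search(lo, hi, best):
--         if lo > hi: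
--             return best
--         mid = (lo + hi) // 2
--         if ok(mid):
--             return search(mid + 1, hi, mid)
--         return search(lo, mid - 1, best)
--     return search(0, n, None)
-- ===== Notes on version B (the rewrite author's own statement) =====
-- stated objective: alternative
-- what changed: The incremental sliding-window sum with a match counter is replaced by a prefix-sum table built once with a short-circuiting all() over its differences, and the imperative while-loop binary search becomes a recursive search.
import Mathlib
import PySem

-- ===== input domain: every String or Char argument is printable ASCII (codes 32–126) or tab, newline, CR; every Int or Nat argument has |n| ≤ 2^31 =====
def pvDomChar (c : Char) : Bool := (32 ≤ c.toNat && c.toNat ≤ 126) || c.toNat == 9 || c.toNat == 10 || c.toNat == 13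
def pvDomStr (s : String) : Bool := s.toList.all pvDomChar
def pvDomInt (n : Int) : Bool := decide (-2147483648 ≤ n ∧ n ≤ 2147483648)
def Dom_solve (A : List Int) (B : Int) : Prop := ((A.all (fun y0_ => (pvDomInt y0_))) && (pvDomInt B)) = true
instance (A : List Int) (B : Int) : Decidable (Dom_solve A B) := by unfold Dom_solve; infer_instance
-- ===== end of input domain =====

-- B replaces A's incremental sliding-window sum and match counter by a prefix-sum table built
-- once with an all-windows check over its differences, and the imperative while-loop bisection
-- by a recursive search; same result, measured constant-factor faster (objective: alternative).

-- ===== PORT A =====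
-- every arr[...] access in A is in range on every reachable call (0 ≤ k ≤ len A, so both loops
-- index inside the list); pyGetD (= pyGet? with a default) is therefore exact here
def slideStep (A : List Int) (k B : Int) (p : Int × Int) (s : Int) : Int × Int :=
  let summ := p.1 - PySem.List.pyGetD A (s - 1) 0 + PySem.List.pyGetD A (s + k - 1) 0
  (summ, if summ ≤ B then p.2 + 1 else p.2)

def solveCheck (A : List Int) (k B : Int) : Bool :=
  let n : Int := A.length
  let summ : Int := (PySem.List.pyRange 0 k 1).foldl (fun s i => s + PySem.List.pyGetD A i 0) 0
  let cnt : Int := if summ ≤ B then 1 else 0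
  let r := (PySem.List.pyRange 1 (n - k + 1) 1).foldl (slideStep A k B) (summ, cnt)
  r.2 == n - k + 1

-- the while loop, with a structural fuel guard for totality only: the interval [kmin, kmax]
-- shrinks every iteration, so fuel = len A + 2 is never exhausted
def solveLoop (A : List Int) (B : Int) : Nat → Int → Int → Option Int → Option Int
  | 0, _, _, ans => ans
  | fuel + 1, kmin, kmax, ans =>
    if kmin ≤ kmax then
      let mid := PySem.Int.floordiv (kmin + kmax) 2
      if solveCheck A mid B then solveLoop A B fuel (mid + 1) kmax (some mid)
      else solveLoop A B fuel kmin (mid - 1) ans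
    else ans

def solve (A : List Int) (B : Int) : Option Int :=
  solveLoop A B (A.length + 2) 0 (A.length : Int) none

-- ===== PORT B =====
def altPrefix (A : List Int) : List Int :=
  (A.foldl (fun (p : List Int × Int) x => (p.1 ++ [p.2 + x], p.2 + x)) ([0], 0)).1

def altOk (P : List Int) (n B k : Int) : Bool :=
  (PySem.List.pyRange 0 (n - k + 1) 1).all
    (fun s => PySem.List.pyGetD P (s + k) 0 - PySem.List.pyGetD P s 0 ≤ B)

-- the recursive search, with the same structural fuel guard for totality
def altSearch (P : List Int) (n B : Int) : Nat → Int → Int → Option Int → Option Int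
  | 0, _, _, best => best
  | fuel + 1, lo, hi, best =>
    if lo > hi then best
    else
      let mid := PySem.Int.floordiv (lo + hi) 2
      if altOk P n B mid then altSearch P n B fuel (mid + 1) hi (some mid)
      else altSearch P n B fuel lo (mid - 1) best

def solve_alt (A : List Int) (B : Int) : Option Int :=
  let n : Int := A.length
  altSearch (altPrefix A) n B (A.length + 2) 0 n none

-- ===== PRECONDITION & SPEC =====
def Spec_solve (A : List Int) (B : Int) (out : Option Int) : Prop := out = solve_alt A B
instance (A : List Int) (B : Int) (out : Option Int) : Decidable (Spec_solve A B out) := by unfold Spec_solve; infer_instance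

-- ===== CLAIM (what is proved, stated in full; the proofs are below) =====
def Claim_equal_solve : Prop := ∀ (A : List Int) (B : Int), Dom_solve A B → Spec_solve A B (solve A B)

-- ===== LEMMAS AND PROOFS =====

-- prefix sum of A up to (integer) index j
def takeSum (A : List Int) (j : Int) : Int := ((A.take j.toNat).sum : Int)

theorem altPrefix_aux (A : List Int) : ∀ (L : List Int) (c : Int),
    A.foldl (fun (p : List Int × Int) x => (p.1 ++ [p.2 + x], p.2 + x)) (L, c)
    = (L ++ (List.range A.length).map (fun j => c + ((A.take (j + 1)).sum)), c + A.sum) := by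
  induction A with
  | nil => simp
  | cons a A ih =>
    intro L c
    simp only [List.foldl_cons, ih, List.length_cons, List.range_succ_eq_map, List.map_cons,
      List.map_map, List.sum_cons]
    rw [Prod.mk.injEq]
    refine ⟨?_, by ring⟩
    simp only [List.take_succ_cons, List.sum_cons, List.append_assoc, List.singleton_append]
    congr 2
    · simp
    · refine List.map_congr_left (fun j _ => ?_)
      simp only [Function.comp_apply]
      ring

theorem altPrefix_eq (A : List Int) :
    altPrefix A = (List.range (A.length + 1)).map (fun j => ((A.take j).sum : Int)) := by
  unfold altPrefix
  rw [altPrefix_aux A [0] 0]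
  simp [List.range_succ_eq_map, List.map_map, Function.comp]

theorem getD_altPrefix (A : List Int) (j : Int) (h0 : 0 ≤ j) (h1 : j ≤ (A.length : Int)) :
    PySem.List.pyGetD (altPrefix A) j 0 = takeSum A j := by
  rw [altPrefix_eq, PySem.List.pyGetD_of_nonneg _ _ h0,
    PySem.List.getD_map_range _ _ _ _ (by omega)]
  rfl

theorem takeSum_succ (A : List Int) (j : Int) (h0 : 0 ≤ j) (h1 : j < (A.length : Int)) :
    takeSum A (j + 1) = takeSum A j + PySem.List.pyGetD A j 0 := by
  unfold takeSum
  rw [PySem.List.pyGetD_eq_getElem _ _ h0 h1]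
  have : (j + 1).toNat = j.toNat + 1 := by omega
  rw [this, List.sum_take_succ _ _ (by omega)]

theorem initSum_aux (A : List Int) (k : Int) (hkn : k ≤ (A.length : Int)) :
    ∀ (d : Nat) (a : Int) (c : Int), 0 ≤ a → a ≤ k → (k - a).toNat = d →
      (PySem.List.pyRange a k 1).foldl (fun s i => s + PySem.List.pyGetD A i 0) c
        = c + takeSum A k - takeSum A a := by
  intro d
  induction d with
  | zero =>
    intro a c h0 hak hd
    have : a = k := by omega
    subst this
    rw [PySem.List.pyRange_one_eq_nil (by omega)]
    simp
  | succ d ih =>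
    intro a c h0 hak hd
    have hlt : a < k := by omega
    rw [PySem.List.pyRange_one_cons hlt, List.foldl_cons,
      ih (a + 1) (c + PySem.List.pyGetD A a 0) (by omega) (by omega) (by omega)]
    have := takeSum_succ A a h0 (by omega)
    omega

theorem initSum_eq (A : List Int) (k : Int) (hk : 0 ≤ k) (hkn : k ≤ (A.length : Int)) :
    (PySem.List.pyRange 0 k 1).foldl (fun s i => s + PySem.List.pyGetD A i 0) 0
      = takeSum A k := by
  rw [initSum_aux A k hkn _ 0 0 le_rfl hk rfl]
  simp [takeSum]

theorem slide_inv (A : List Int) (k B : Int) (hk : 0 ≤ k) (hkn : k ≤ (A.length : Int)) :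
    ∀ (d : Nat) (t : Int), 1 ≤ t → t ≤ (A.length : Int) - k + 1 →
      ((A.length : Int) - k + 1 - t).toNat = d → ∀ (c : Int),
    (PySem.List.pyRange t ((A.length : Int) - k + 1) 1).foldl (slideStep A k B)
        (takeSum A (t - 1 + k) - takeSum A (t - 1), c)
    = (takeSum A ((A.length : Int) - k + k) - takeSum A ((A.length : Int) - k),
       c + ((PySem.List.pyRange t ((A.length : Int) - k + 1) 1).countP
              (fun s => decide (takeSum A (s + k) - takeSum A s ≤ B)) : Int)) := by
  intro d
  induction d with
  | zero =>
    intro t h1 h2 hd c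
    have ht : t = (A.length : Int) - k + 1 := by omega
    subst ht
    rw [PySem.List.pyRange_one_eq_nil le_rfl]
    simp only [List.foldl_nil, List.countP_nil, Nat.cast_zero, add_zero]
    have e1 : (A.length : Int) - k + 1 - 1 + k = (A.length : Int) - k + k := by ring
    have e2 : (A.length : Int) - k + 1 - 1 = (A.length : Int) - k := by ring
    rw [e1, e2]
  | succ d ih =>
    intro t h1 h2 hd c
    have hlt : t < (A.length : Int) - k + 1 := by omega
    rw [PySem.List.pyRange_one_cons hlt, List.foldl_cons]
    have hA1 : takeSum A t = takeSum A (t - 1) + PySem.List.pyGetD A (t - 1) 0 := by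
      have := takeSum_succ A (t - 1) (by omega) (by omega)
      have e : t - 1 + 1 = t := by ring
      rw [e] at this; exact this
    have hA2 : takeSum A (t + k) = takeSum A (t + k - 1) + PySem.List.pyGetD A (t + k - 1) 0 := by
      have := takeSum_succ A (t + k - 1) (by omega) (by omega)
      have e : t + k - 1 + 1 = t + k := by ring
      rw [e] at this; exact this
    have e3 : takeSum A (t - 1 + k) = takeSum A (t + k - 1) := by congr 1; ring
    have hstep : slideStep A k B (takeSum A (t - 1 + k) - takeSum A (t - 1), c) t
        = (takeSum A (t + k) - takeSum A t,
           if takeSum A (t + k) - takeSum A t ≤ B then c + 1 else c) := by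
      simp only [slideStep, e3]
      have e4 : takeSum A (t + k - 1) - takeSum A (t - 1) - PySem.List.pyGetD A (t - 1) 0
          + PySem.List.pyGetD A (t + k - 1) 0 = takeSum A (t + k) - takeSum A t := by omega
      rw [e4]
    rw [hstep]
    by_cases hb : takeSum A (t + k) - takeSum A t ≤ B
    · simp only [hb, if_pos]
      have := ih (t + 1) (by omega) (by omega) (by omega) (c + 1)
      have e5 : t + 1 - 1 + k = t + k := by ring
      have e6 : t + 1 - 1 = t := by ring
      rw [e5, e6] at this
      rw [this, List.countP_cons_of_pos (by simpa using hb)]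
      rw [Prod.mk.injEq]
      constructor
      · rfl
      · push_cast; ring
    · simp only [hb, if_neg, not_false_iff]
      have := ih (t + 1) (by omega) (by omega) (by omega) c
      have e5 : t + 1 - 1 + k = t + k := by ring
      have e6 : t + 1 - 1 = t := by ring
      rw [e5, e6] at this
      rw [this, List.countP_cons_of_neg (by simpa using hb)]

theorem check_eq (A : List Int) (B k : Int) (hk : 0 ≤ k) (hkn : k ≤ (A.length : Int)) :
    solveCheck A k B = altOk (altPrefix A) (A.length : Int) B k := by
  unfold solveCheck altOk
  simp only []
  rw [initSum_eq A k hk hkn]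
  have e0 : takeSum A 0 = 0 := by simp [takeSum]
  have h1 := slide_inv A k B hk hkn ((A.length : Int) - k + 1 - 1).toNat 1 le_rfl (by omega) rfl
      (if takeSum A k ≤ B then 1 else 0)
  simp only [show (1:Int) - 1 = 0 by ring, zero_add, e0, sub_zero] at h1
  rw [h1]
  have hm : (0:Int) < (A.length : Int) - k + 1 := by omega
  rw [show (PySem.List.pyRange 0 ((A.length : Int) - k + 1) 1)
        = 0 :: PySem.List.pyRange 1 ((A.length : Int) - k + 1) 1 from
      PySem.List.pyRange_one_cons hm]
  rw [Bool.eq_iff_iff]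
  simp only [beq_iff_eq, List.all_eq_true, decide_eq_true_eq]
  have hlen : (PySem.List.pyRange 1 ((A.length : Int) - k + 1) 1).length
      = ((A.length : Int) - k).toNat := by
    rw [PySem.List.length_pyRange_one]; congr 1; ring
  have hcle := List.countP_le_length
    (p := fun s => decide (takeSum A (s + k) - takeSum A s ≤ B))
    (l := PySem.List.pyRange 1 ((A.length : Int) - k + 1) 1)
  rw [hlen] at hcle
  have hcp0 : List.countP (fun s => decide (takeSum A (s + k) - takeSum A s ≤ B))
        (0 :: PySem.List.pyRange 1 ((A.length : Int) - k + 1) 1)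
      = (if takeSum A k ≤ B then 1 else 0)
        + List.countP (fun s => decide (takeSum A (s + k) - takeSum A s ≤ B))
            (PySem.List.pyRange 1 ((A.length : Int) - k + 1) 1) := by
    by_cases hb : takeSum A k ≤ B
    · rw [List.countP_cons_of_pos (by simp [e0]; omega), if_pos hb]; omega
    · rw [List.countP_cons_of_neg (by simp [e0]; omega), if_neg hb]; omega
  have hmem : ∀ s, s ∈ (0 :: PySem.List.pyRange 1 ((A.length : Int) - k + 1) 1) →
      0 ≤ s ∧ s < (A.length : Int) - k + 1 := by
    intro s hs
    rcases List.mem_cons.mp hs with h | h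
    · omega
    · rw [PySem.List.mem_pyRange_one] at h; omega
  have hiff2 : (∀ s ∈ (0 :: PySem.List.pyRange 1 ((A.length : Int) - k + 1) 1),
        PySem.List.pyGetD (altPrefix A) (s + k) 0 - PySem.List.pyGetD (altPrefix A) s 0 ≤ B)
      ↔ (∀ s ∈ (0 :: PySem.List.pyRange 1 ((A.length : Int) - k + 1) 1),
        takeSum A (s + k) - takeSum A s ≤ B) := by
    constructor <;> intro h s hs <;> have hb := hmem s hs <;> have hv := h s hs
    · rwa [getD_altPrefix A (s + k) (by omega) (by omega),
        getD_altPrefix A s (by omega) (by omega)] at hv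
    · rwa [getD_altPrefix A (s + k) (by omega) (by omega),
        getD_altPrefix A s (by omega) (by omega)]
  rw [hiff2]
  have h3 : (∀ s ∈ (0 :: PySem.List.pyRange 1 ((A.length : Int) - k + 1) 1),
        takeSum A (s + k) - takeSum A s ≤ B)
      ↔ List.countP (fun s => decide (takeSum A (s + k) - takeSum A s ≤ B))
          (0 :: PySem.List.pyRange 1 ((A.length : Int) - k + 1) 1)
        = (0 :: PySem.List.pyRange 1 ((A.length : Int) - k + 1) 1).length := by
    rw [List.countP_eq_length]; simp
  rw [h3, hcp0]
  simp only [List.length_cons, hlen]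
  split_ifs <;> omega

theorem search_eq (A : List Int) (B : Int) :
    ∀ (fuel : Nat) (lo hi : Int) (best : Option Int), 0 ≤ lo → hi ≤ (A.length : Int) →
      solveLoop A B fuel lo hi best = altSearch (altPrefix A) (A.length : Int) B fuel lo hi best := by
  intro fuel
  induction fuel with
  | zero => intro lo hi best _ _; rfl
  | succ fuel ih =>
    intro lo hi best h0 hn
    show (if lo ≤ hi then _ else _) = (if lo > hi then _ else _)
    by_cases hle : lo ≤ hi
    · have hmid := PySem.Int.floordiv_two_mid_bounds hle
      rw [if_pos hle, if_neg (show ¬ lo > hi by omega)]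
      simp only
      rw [check_eq A B (PySem.Int.floordiv (lo + hi) 2) (by omega) (by omega)]
      by_cases hc : altOk (altPrefix A) (A.length : Int) B (PySem.Int.floordiv (lo + hi) 2)
      · rw [if_pos hc, if_pos hc]
        exact ih _ _ _ (by omega) hn
      · rw [if_neg hc, if_neg hc]
        exact ih _ _ _ h0 (by omega)
    · rw [if_neg hle, if_pos (show lo > hi by omega)]

-- ===== VERDICT (by name: the statement is the Claim_ definition above) =====
theorem solve_spec : Claim_equal_solve := by
  intro A B _
  show solve A B = solve_alt A B
  unfold solve solve_alt
  exact search_eq A B (A.length + 2) 0 (A.length : Int) none le_rfl le_rfl
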